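-- pv_equiv track=rewrite | github.com/tgkei/Algorithm_study | by_python/skt/2.py | solution
-- ===== SOURCE A (Python) =====
-- def solution(A, F, M):
--     # write your code in Python 3.6
--     total = M * (len(A) + F)
--     start = 1
--     needed = total - sum(A)
--     if start * F > needed: return [0]
--     while (((start+1) * F) < needed) and start < 6:
--         start+=1
--
--     if start == 6:
--         if (6 * F) == needed: return [6 for _ in range(F)]
--         else: return [0]
--
--     num_of_big = needed - (start * F)
--     num_of_small = F - num_of_big
--     ret = []
--     for _ in range(num_of_small):
--         ret.append(start)
--     for _ in range(num_of_big):
--         ret.append(start+1)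
--     return ret
-- ===== SOURCE B (Python) =====
-- def solution(A, F, M):
--     needed = M * (len(A) + F) - sum(A)
--     if F == 0:
--         return [] if needed == 0 else [0]
--     if needed < F or needed > 6 * F:
--         return [0]
--     q, r = divmod(needed, F)
--     return [q] * (F - r) + [q + 1] * r
-- ===== Notes on version B (the rewrite author's own statement) =====
-- stated objective: simpler
-- what changed: Replaces A's bounded linear search for the base die value (while-loop incrementing start) and its two append loops with a single closed-form divmod: q,r = divmod(needed,F) and [q]*(F-r)+[q+1]*r, with an explicit F==0 guard where A never divides.
import Mathlib
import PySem

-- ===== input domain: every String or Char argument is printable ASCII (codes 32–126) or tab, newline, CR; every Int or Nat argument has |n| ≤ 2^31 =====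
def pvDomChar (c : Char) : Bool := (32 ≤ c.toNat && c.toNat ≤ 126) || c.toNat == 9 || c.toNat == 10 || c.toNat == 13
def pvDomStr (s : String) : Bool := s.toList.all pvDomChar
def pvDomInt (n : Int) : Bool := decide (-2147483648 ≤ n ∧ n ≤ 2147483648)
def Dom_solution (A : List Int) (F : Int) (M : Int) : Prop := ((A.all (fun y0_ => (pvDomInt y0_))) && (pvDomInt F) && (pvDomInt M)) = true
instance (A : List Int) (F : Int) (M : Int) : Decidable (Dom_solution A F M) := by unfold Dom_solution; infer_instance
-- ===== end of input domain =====

-- B replaces A's bounded linear search for the base die value with one closed-form divmod (objective: simpler).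
-- ===== PORT A =====
-- the while-loop 'while (start+1)*F < needed and start < 6: start += 1'; it runs at most 5 times
-- (start goes 1..6), so fuel 5 makes the recursion total without changing what it computes
def solutionLoop (F needed : Int) (start : Int) : Nat → Int
  | 0 => start
  | fuel + 1 =>
    if (start + 1) * F < needed ∧ start < 6 then solutionLoop F needed (start + 1) fuel
    else start

def solution (A : List Int) (F : Int) (M : Int) : List Int :=
  let total := M * ((A.length : Int) + F)
  let needed := total - A.sum
  if 1 * F > needed then [0]
  else
    let start := solutionLoop F needed 1 5
    if start = 6 then
      if 6 * F = needed then List.replicate F.toNat 6 else [0]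
    else
      let num_of_big := needed - start * F
      let num_of_small := F - num_of_big
      List.replicate num_of_small.toNat start ++ List.replicate num_of_big.toNat (start + 1)

-- ===== PORT B =====
def solution_alt (A : List Int) (F : Int) (M : Int) : List Int :=
  let needed := M * ((A.length : Int) + F) - A.sum
  if F = 0 then (if needed = 0 then [] else [0])
  else if needed < F ∨ needed > 6 * F then [0]
  else
    let q := PySem.Int.floordiv needed F
    let r := PySem.Int.mod needed F
    List.replicate (F - r).toNat q ++ List.replicate r.toNat (q + 1)

-- ===== PRECONDITION & SPEC =====
def Spec_solution (A : List Int) (F : Int) (M : Int) (out : List Int) : Prop := out = solution_alt A F M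
instance (A : List Int) (F : Int) (M : Int) (out : List Int) : Decidable (Spec_solution A F M out) := by unfold Spec_solution; infer_instance

-- ===== CLAIM (what is proved, stated in full; the proofs are below) =====
def Claim_equal_solution : Prop := ∀ (A : List Int) (F : Int) (M : Int), Dom_solution A F M → Spec_solution A F M (solution A F M)

-- ===== LEMMAS AND PROOFS =====

-- the fill step: for 0 < F and s*F ≤ n ≤ (s+1)*F, A's [s]*(F-(n-s*F)) + [s+1]*(n-s*F)
-- equals B's [n//F]*(F - n%F) + [n//F + 1]*(n%F)
theorem repl_eq (F n s : Int) (hF : 0 < F) (hlo : s * F ≤ n) (hhi : n ≤ (s + 1) * F) :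
    List.replicate (F - (n - s * F)).toNat s ++ List.replicate (n - s * F).toNat (s + 1)
    = List.replicate (F - PySem.Int.mod n F).toNat (PySem.Int.floordiv n F) ++
        List.replicate (PySem.Int.mod n F).toNat (PySem.Int.floordiv n F + 1) := by
  have hm := PySem.Int.floordiv_mul_add_mod n F
  by_cases h : n = (s + 1) * F
  · have hq : PySem.Int.floordiv n F = s + 1 := by
      rw [PySem.Int.floordiv_eq_iff_of_pos hF]
      constructor <;> nlinarith
    rw [hq] at hm
    have hr : PySem.Int.mod n F = 0 := by linarith
    have e1 : n - s * F = F := by linear_combination h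
    rw [hq, hr, e1]
    simp
  · have hq : PySem.Int.floordiv n F = s := by
      rw [PySem.Int.floordiv_eq_iff_of_pos hF]
      exact ⟨hlo, lt_of_le_of_ne hhi h⟩
    rw [hq] at hm
    have hr : PySem.Int.mod n F = n - s * F := by linarith
    rw [hq, hr]

-- both programs depend on the input only through F and needed; this equation is the whole claim
theorem core (F n : Int) :
    (if 1 * F > n then [0]
     else
       let start := solutionLoop F n 1 5
       if start = 6 then
         if 6 * F = n then List.replicate F.toNat 6 else [0]
       else
         let big := n - start * F
         List.replicate (F - big).toNat start ++ List.replicate big.toNat (start + 1))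
    = (if F = 0 then (if n = 0 then ([] : List Int) else [0])
       else if n < F ∨ n > 6 * F then [0]
       else
         List.replicate (F - PySem.Int.mod n F).toNat (PySem.Int.floordiv n F) ++
           List.replicate (PySem.Int.mod n F).toNat (PySem.Int.floordiv n F + 1)) := by
  by_cases h1 : 1 * F > n
  · rw [if_pos h1]
    split_ifs <;> first | rfl | (exfalso; omega)
  · rw [if_neg h1]
    have e : solutionLoop F n 1 5 =
        if 2 * F < n then (if 3 * F < n then (if 4 * F < n then
          (if 5 * F < n then (if 6 * F < n then 6 else 5) else 4) else 3) else 2) else 1 := by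
      norm_num [solutionLoop]
    rw [e]
    by_cases c2 : 2 * F < n
    · by_cases c3 : 3 * F < n
      · by_cases c4 : 4 * F < n
        · by_cases c5 : 5 * F < n
          · by_cases c6 : 6 * F < n
            · simp only [if_pos c2, if_pos c3, if_pos c4, if_pos c5, if_pos c6]
              simp only [reduceIte]
              rw [if_neg (show ¬(6 * F = n) by omega)]
              split_ifs <;> first | rfl | (exfalso; omega)
            · simp only [if_pos c2, if_pos c3, if_pos c4, if_pos c5, if_neg c6]
              have hF : 0 < F := by omega
              rw [if_neg (show ¬ F = 0 by omega), if_neg (show ¬(n < F ∨ n > 6 * F) by omega)]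
              exact repl_eq F n 5 hF (by omega) (by omega)
          · simp only [if_pos c2, if_pos c3, if_pos c4, if_neg c5]
            have hF : 0 < F := by omega
            rw [if_neg (show ¬ F = 0 by omega), if_neg (show ¬(n < F ∨ n > 6 * F) by omega)]
            exact repl_eq F n 4 hF (by omega) (by omega)
        · simp only [if_pos c2, if_pos c3, if_neg c4]
          have hF : 0 < F := by omega
          rw [if_neg (show ¬ F = 0 by omega), if_neg (show ¬(n < F ∨ n > 6 * F) by omega)]
          exact repl_eq F n 3 hF (by omega) (by omega)
      · simp only [if_pos c2, if_neg c3]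
        have hF : 0 < F := by omega
        rw [if_neg (show ¬ F = 0 by omega), if_neg (show ¬(n < F ∨ n > 6 * F) by omega)]
        exact repl_eq F n 2 hF (by omega) (by omega)
    · simp only [if_neg c2]
      by_cases hF0 : F = 0
      · have hn : n = 0 := by omega
        rw [if_pos hF0, if_pos hn]
        subst hF0; subst hn
        norm_num
      · have hF : 0 < F := by omega
        rw [if_neg hF0, if_neg (show ¬(n < F ∨ n > 6 * F) by omega)]
        exact repl_eq F n 1 hF (by omega) (by omega)

-- ===== VERDICT (by name: the statement is the Claim_ definition above) =====
theorem solution_spec : Claim_equal_solution := by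
  intro A F M _
  unfold Spec_solution solution solution_alt
  exact core F (M * ((A.length : Int) + F) - A.sum)
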